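-- pv_equiv track=rewrite | github.com/LeeJangHee/CodingTest | 프로그래머스/삼각달팽이.py | solution
-- ===== SOURCE A (Python) =====
-- def solution(n):
--     answer = []
--     array = [[0] * n for _ in range(n)]
--     x, y = -1, 0
--     count = 1
--     for i in range(n):
--         for j in range(i, n):
--             if i % 3 == 0:  # Down
--                 x += 1
--             elif i % 3 == 1:  # Right
--                 y += 1
--             elif i % 3 == 2:  # Up
--                 x -= 1
--                 y -= 1
--
--             # 넣기
--             array[x][y] = count
--             count += 1
--
--     # 조합
--     for i in range(n):
--         for j in range(n):
--             if array[i][j] != 0: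
--                 answer.append(array[i][j])
--     return answer
-- ===== SOURCE B (Python) =====
-- def solution(n):
--     # Closed form: ring index k = min(c, n-1-r, r-c); each ring's three legs
--     # (down column c=k, bottom row r=n-1-k, up-left diagonal r-c=k) get
--     # consecutive numbers starting after the 3k outer legs. No matrix, no walk.
--     def value(r, c):
--         k = min(c, n - 1 - r, r - c)
--         m = n - 3 * k
--         base = 3 * k * n - 3 * k * (3 * k - 1) // 2
--         if c == k:
--             return base + (r - 2 * k) + 1
--         if r == n - 1 - k:
--             return base + m + (c - k)
--         return base + 2 * m - 1 + (n - 1 - k - r)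
--     return [value(r, c) for r in range(n) for c in range(r + 1)]
-- ===== Notes on version B (the rewrite author's own statement) =====
-- stated objective: alternative
-- what changed: B computes each triangle cell's number directly by a closed-form formula (ring index k = min(c, n-1-r, r-c) identifies the leg; arithmetic on k gives the value) and emits the triangle rows as a comprehension, with no matrix, no spiral walk and no nonzero filtering.
import Mathlib
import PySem

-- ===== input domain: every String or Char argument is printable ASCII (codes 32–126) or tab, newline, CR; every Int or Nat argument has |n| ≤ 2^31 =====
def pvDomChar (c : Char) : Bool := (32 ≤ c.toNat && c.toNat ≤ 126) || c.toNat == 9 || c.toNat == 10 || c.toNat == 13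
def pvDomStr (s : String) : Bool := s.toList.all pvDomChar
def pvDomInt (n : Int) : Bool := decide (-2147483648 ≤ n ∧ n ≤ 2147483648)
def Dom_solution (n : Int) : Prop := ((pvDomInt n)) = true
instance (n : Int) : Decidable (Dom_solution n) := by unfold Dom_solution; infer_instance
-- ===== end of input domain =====

-- B replaces A's spiral walk entirely by a per-cell closed-form formula (ring index
-- k = min(c, n-1-r, r-c) picks the leg, arithmetic gives the number) and emits the
-- triangle rows directly without building a matrix; objective: alternative.

-- ===== PORT A =====
-- Python's `array[x][y] = v` (fetch row x, set cell y); total form, in-bounds in all reached uses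
def pySet2 (arr : List (List Int)) (x y v : Int) : List (List Int) :=
  PySem.List.pySetD arr x (PySem.List.pySetD (PySem.List.pyGetD arr x []) y v)

-- body of A's inner `for j in range(i, n)` loop: move by the i%3 branch, then write `count`
def pvStepA (i : Int) (st : List (List Int) × Int × Int × Int) (_ : Int) :
    List (List Int) × Int × Int × Int :=
  let xy : Int × Int :=
    if PySem.Int.mod i 3 = 0 then (st.2.1 + 1, st.2.2.1)
    else if PySem.Int.mod i 3 = 1 then (st.2.1, st.2.2.1 + 1)
    else (st.2.1 - 1, st.2.2.1 - 1)
  (pySet2 st.1 xy.1 xy.2 st.2.2.2, xy.1, xy.2, st.2.2.2 + 1)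

def pvLegA (n : Int) (st : List (List Int) × Int × Int × Int) (i : Int) :
    List (List Int) × Int × Int × Int :=
  (PySem.List.pyRange i n 1).foldl (pvStepA i) st

def solution (n : Int) : List Int :=
  let array := List.replicate n.toNat (List.replicate n.toNat (0:Int))
  let st := (PySem.List.pyRange 0 n 1).foldl (pvLegA n) (array, (-1 : Int), (0 : Int), (1 : Int))
  (PySem.List.pyRange 0 n 1).foldl (fun ans i =>
    (PySem.List.pyRange 0 n 1).foldl (fun ans j =>
      if PySem.List.pyGetD (PySem.List.pyGetD st.1 i []) j 0 ≠ 0 then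
        ans ++ [PySem.List.pyGetD (PySem.List.pyGetD st.1 i []) j 0]
      else ans) ans) []

-- ===== PORT B =====
-- Source B's `min(c, n - 1 - r, r - c)` (the ring index of cell (r, c))
def pvK (n r c : Int) : Int := min c (min (n - 1 - r) (r - c))

-- Source B's inner `value(r, c)`: the closed-form number at triangle cell (r, c)
def pvVal (n r c : Int) : Int :=
  let k := pvK n r c
  let m := n - 3 * k
  let base := 3 * k * n - PySem.Int.floordiv (3 * k * (3 * k - 1)) 2
  if c = k then base + (r - 2 * k) + 1
  else if r = n - 1 - k then base + m + (c - k)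
  else base + 2 * m - 1 + (n - 1 - k - r)

def solution_alt (n : Int) : List Int :=
  (PySem.List.pyRange 0 n 1).flatMap (fun r =>
    (PySem.List.pyRange 0 (r + 1) 1).map (fun c => pvVal n r c))

-- ===== PRECONDITION & SPEC =====
def Spec_solution (n : Int) (out : List Int) : Prop := out = solution_alt n
instance (n : Int) (out : List Int) : Decidable (Spec_solution n out) := by unfold Spec_solution; infer_instance

-- ===== CLAIM (what is proved, stated in full; the proofs are below) =====
def Claim_equal_solution : Prop := ∀ (n : Int), Dom_solution n → Spec_solution n (solution n)

-- ===== LEMMAS AND PROOFS =====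

-- leg index (0-based) of the leg that writes triangle cell (r, c), and the 0-based
-- step within that leg: recovered from the coordinates by the same min as pvK
def pvLegIdx (n r c : Int) : Int :=
  if c = pvK n r c then 3 * pvK n r c
  else if r = n - 1 - pvK n r c then 3 * pvK n r c + 1
  else 3 * pvK n r c + 2

def pvStepOf (n r c : Int) : Int :=
  if c = pvK n r c then r - 2 * pvK n r c
  else if r = n - 1 - pvK n r c then c - pvK n r c - 1
  else n - 2 - pvK n r c - r

-- count at the start of leg i (the first value leg i writes)
def pvCStart (n i : Int) : Int := 1 + i * n - PySem.Int.floordiv (i * (i - 1)) 2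

-- the matrix after all legs < i and the first t steps of leg i have been written
def pvModel (n i t r c : Int) : Int :=
  if 0 ≤ c ∧ c ≤ r ∧ r < n ∧
      (pvLegIdx n r c < i ∨ (pvLegIdx n r c = i ∧ pvStepOf n r c < t)) then
    pvVal n r c
  else 0

def matrixOf (N : Nat) (f : Int → Int → Int) : List (List Int) :=
  (List.range N).map (fun (r : Nat) => (List.range N).map (fun (c : Nat) => f (r : Int) (c : Int)))

-- cursor position just before leg i starts
def pvPos (n i : Int) : Int × Int :=
  let k := PySem.Int.floordiv i 3
  if PySem.Int.mod i 3 = 0 then (2 * k - 1, k)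
  else if PySem.Int.mod i 3 = 1 then (n - k - 1, k)
  else (n - 1 - k, n - 2 * k - 1)

lemma pv_div3 (i k d : Int) (h : i = 3 * k + d) (hd : 0 ≤ d) (hd3 : d < 3) :
    PySem.Int.floordiv i 3 = k ∧ PySem.Int.mod i 3 = d := by
  have h1 := PySem.Int.floordiv_mul_add_mod i 3
  have h2 := PySem.Int.mod_nonneg i (by norm_num : (0:Int) < 3)
  have h3 := PySem.Int.mod_lt i (by norm_num : (0:Int) < 3)
  constructor <;> omega

lemma pv_half (a : Int) : 2 * PySem.Int.floordiv (a * (a - 1)) 2 = a * (a - 1) := by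
  have hdvd : (2 : Int) ∣ a * (a - 1) := by
    have h := Int.even_mul_succ_self (a - 1)
    have : (a - 1) * (a - 1 + 1) = a * (a - 1) := by ring
    rw [this] at h
    exact h.two_dvd
  have h1 := PySem.Int.floordiv_mul_add_mod (a * (a - 1)) 2
  have h2 : PySem.Int.mod (a * (a - 1)) 2 = 0 :=
    (PySem.Int.mod_eq_zero_iff_dvd _ _).mpr hdvd
  omega

lemma pv_foldl_ign {α β : Type} (f : α → α) (xs : List β) (init : α) :
    xs.foldl (fun a _ => f a) init = (List.range xs.length).foldl (fun a _ => f a) init := by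
  induction xs generalizing init with
  | nil => rfl
  | cons x xs ih => simp [List.range_succ_eq_map, List.foldl_map, ih]

def pvStep (dx dy : Int) (st : List (List Int) × Int × Int × Int) : List (List Int) × Int × Int × Int :=
  (pySet2 st.1 (st.2.1 + dx) (st.2.2.1 + dy) st.2.2.2, st.2.1 + dx, st.2.2.1 + dy, st.2.2.2 + 1)

lemma pv_leg (dx dy : Int) (k : Nat) (arr : List (List Int)) (x y cnt : Int) :
    (List.range k).foldl (fun st _ => pvStep dx dy st) (arr, x, y, cnt)
    = (((List.range k).foldl (fun (p : List (List Int) × Int) (j : Nat) =>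
          (pySet2 p.1 (x + dx * (1 + (j:Int))) (y + dy * (1 + (j:Int))) p.2, p.2 + 1)) (arr, cnt)).1,
       x + dx * k, y + dy * k,
       ((List.range k).foldl (fun (p : List (List Int) × Int) (j : Nat) =>
          (pySet2 p.1 (x + dx * (1 + (j:Int))) (y + dy * (1 + (j:Int))) p.2, p.2 + 1)) (arr, cnt)).2) := by
  induction k with
  | zero => simp
  | succ k ih =>
    rw [List.range_succ, List.foldl_append, List.foldl_append, ih]
    simp only [List.foldl_cons, List.foldl_nil, pvStep]
    have h1 : x + dx * (k:Int) + dx = x + dx * (1 + (k:Int)) := by ring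
    have h2 : y + dy * (k:Int) + dy = y + dy * (1 + (k:Int)) := by ring
    simp [h1, h2]
    omega

-- reading / writing a `(List.range N).map g` list at a nonnegative Int index
lemma range_map_get {α : Type} (N : Nat) (g : Nat → α) (x : Int) (d : α)
    (h0 : 0 ≤ x) (hx : x.toNat < N) :
    PySem.List.pyGetD ((List.range N).map g) x d = g x.toNat := by
  rw [PySem.List.pyGetD_eq_getElem _ d h0 (by simp; omega)]
  simp

lemma range_map_set {α : Type} (N : Nat) (g : Nat → α) (x : Int) (v : α)
    (h0 : 0 ≤ x) (hx : x.toNat < N) :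
    PySem.List.pySetD ((List.range N).map g) x v
      = (List.range N).map (fun (r : Nat) => if (r : Int) = x then v else g r) := by
  rw [PySem.List.pySetD_of_nonneg _ _ h0]
  apply List.ext_getElem
  · simp
  · intro i h1 h2
    simp only [List.getElem_set, List.getElem_map, List.getElem_range]
    by_cases h : x.toNat = i
    · rw [if_pos h, if_pos (by omega)]
    · rw [if_neg h, if_neg (by omega)]

-- one in-bounds write: the model advances by one step of leg i
lemma pv_write_one (n : Int) (i t x y : Int)
    (hb : 0 ≤ y ∧ y ≤ x ∧ x < n)
    (hidx : pvLegIdx n x y = i) (hstep : pvStepOf n x y = t)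
    (hval : pvVal n x y = pvCStart n i + t)
    (huniq : ∀ r c : Int, 0 ≤ c → c ≤ r → r < n →
        pvLegIdx n r c = i → pvStepOf n r c = t → r = x ∧ c = y) :
    pySet2 (matrixOf n.toNat (pvModel n i t)) x y (pvCStart n i + t)
      = matrixOf n.toNat (pvModel n i (t + 1)) := by
  have hptw : ∀ r c : Int, pvModel n i (t + 1) r c
      = if r = x ∧ c = y then pvCStart n i + t else pvModel n i t r c := by
    intro r c
    by_cases hxy : r = x ∧ c = y
    · rw [if_pos hxy, hxy.1, hxy.2]
      unfold pvModel
      rw [if_pos ⟨by omega, by omega, by omega, Or.inr ⟨hidx, by omega⟩⟩, hval]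
    · rw [if_neg hxy]
      unfold pvModel
      congr 1
      simp only [eq_iff_iff]
      constructor
      · rintro ⟨h1, h2, h3, h4 | h4⟩
        · exact ⟨h1, h2, h3, Or.inl h4⟩
        · have hne : pvStepOf n r c ≠ t := by
            intro he
            obtain ⟨e1, e2⟩ := huniq r c h1 h2 h3 h4.1 he
            exact hxy ⟨e1, e2⟩
          refine ⟨h1, h2, h3, Or.inr ⟨h4.1, by omega⟩⟩
      · rintro ⟨h1, h2, h3, h4 | h4⟩
        · exact ⟨h1, h2, h3, Or.inl h4⟩
        · exact ⟨h1, h2, h3, Or.inr ⟨h4.1, by omega⟩⟩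
  have hx0 : 0 ≤ x := by omega
  have hy0 : 0 ≤ y := by omega
  have hxN : x.toNat < n.toNat := by omega
  have hyN : y.toNat < n.toNat := by omega
  unfold pySet2 matrixOf
  rw [range_map_get _ _ _ _ hx0 hxN, range_map_set _ _ _ _ hy0 hyN,
    range_map_set _ _ _ _ hx0 hxN]
  apply List.map_congr_left
  intro r hr
  by_cases hrx : (r : Int) = x
  · rw [if_pos hrx]
    apply List.map_congr_left
    intro c hc
    rw [hptw]
    by_cases hcy : (c : Int) = y
    · rw [if_pos hcy, if_pos ⟨hrx, hcy⟩]
    · rw [if_neg hcy, if_neg (by tauto)]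
      rw [show ((x.toNat : Int)) = x from by omega, hrx]
  · rw [if_neg hrx]
    apply List.map_congr_left
    intro c hc
    rw [hptw, if_neg (by tauto)]

-- the batch of K writes of leg i drives the model from step 0 to step K
lemma pv_fill (n i x y dx dy : Int) (K : Nat)
    (hc : ∀ t : Nat, t < K →
      (0 ≤ y + dy * (1 + (t:Int)) ∧ y + dy * (1 + (t:Int)) ≤ x + dx * (1 + (t:Int)) ∧
        x + dx * (1 + (t:Int)) < n) ∧
      pvLegIdx n (x + dx * (1 + (t:Int))) (y + dy * (1 + (t:Int))) = i ∧
      pvStepOf n (x + dx * (1 + (t:Int))) (y + dy * (1 + (t:Int))) = (t:Int) ∧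
      pvVal n (x + dx * (1 + (t:Int))) (y + dy * (1 + (t:Int))) = pvCStart n i + t ∧
      (∀ r c : Int, 0 ≤ c → c ≤ r → r < n →
        pvLegIdx n r c = i → pvStepOf n r c = (t:Int) →
        r = x + dx * (1 + (t:Int)) ∧ c = y + dy * (1 + (t:Int)))) :
    (List.range K).foldl (fun (p : List (List Int) × Int) (j : Nat) =>
        (pySet2 p.1 (x + dx * (1 + (j:Int))) (y + dy * (1 + (j:Int))) p.2, p.2 + 1))
      (matrixOf n.toNat (pvModel n i 0), pvCStart n i)
    = (matrixOf n.toNat (pvModel n i K), pvCStart n i + K) := by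
  induction K with
  | zero => simp
  | succ K ih =>
    rw [List.range_succ, List.foldl_append,
      ih (fun t ht => hc t (by omega))]
    simp only [List.foldl_cons, List.foldl_nil]
    obtain ⟨h1, h2, h3, h4, h5⟩ := hc K (by omega)
    have hw := pv_write_one n i (K : Int) (x + dx * (1 + (K : Int)))
      (y + dy * (1 + (K : Int))) h1 h2 h3 h4 h5
    rw [hw, show ((K + 1 : Nat) : Int) = (K : Int) + 1 from by push_cast; ring]
    simp only [Prod.mk.injEq]
    exact ⟨trivial, by ring⟩

-- the three per-direction facts: coordinates, leg index, step, value and uniqueness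
lemma pv_cell_down (n k t : Int) (hk : 0 ≤ k) (hn : 3 * k < n) (ht0 : 0 ≤ t) (ht : t < n - 3 * k) :
    (0 ≤ k ∧ k ≤ 2 * k + t ∧ 2 * k + t < n) ∧
    pvLegIdx n (2 * k + t) k = 3 * k ∧ pvStepOf n (2 * k + t) k = t ∧
    pvVal n (2 * k + t) k = pvCStart n (3 * k) + t ∧
    (∀ r c : Int, 0 ≤ c → c ≤ r → r < n → pvLegIdx n r c = 3 * k → pvStepOf n r c = t →
      r = 2 * k + t ∧ c = k) := by
  have hKv : pvK n (2 * k + t) k = k := by unfold pvK; omega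
  refine ⟨⟨by omega, by omega, by omega⟩, ?_, ?_, ?_, ?_⟩
  · unfold pvLegIdx
    rw [hKv]
    split_ifs <;> omega
  · unfold pvStepOf
    rw [hKv]
    split_ifs <;> omega
  · unfold pvVal pvCStart
    rw [hKv]
    dsimp only
    have hq1 := pv_half (3 * k)
    have hq2 := pv_half (3 * k + 1)
    have hq3 := pv_half (3 * k + 2)
    split_ifs <;> first | omega | linarith
  · intro r c h1 h2 h3 hidx hstep
    simp only [pvLegIdx, pvStepOf, pvK] at hidx hstep
    split_ifs at hidx hstep <;> constructor <;> omega

lemma pv_cell_right (n k t : Int) (hk : 0 ≤ k) (hn : 3 * k + 1 < n) (ht0 : 0 ≤ t)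
    (ht : t < n - 3 * k - 1) :
    (0 ≤ k + 1 + t ∧ k + 1 + t ≤ n - 1 - k ∧ n - 1 - k < n) ∧
    pvLegIdx n (n - 1 - k) (k + 1 + t) = 3 * k + 1 ∧
    pvStepOf n (n - 1 - k) (k + 1 + t) = t ∧
    pvVal n (n - 1 - k) (k + 1 + t) = pvCStart n (3 * k + 1) + t ∧
    (∀ r c : Int, 0 ≤ c → c ≤ r → r < n → pvLegIdx n r c = 3 * k + 1 → pvStepOf n r c = t →
      r = n - 1 - k ∧ c = k + 1 + t) := by
  have hKv : pvK n (n - 1 - k) (k + 1 + t) = k := by unfold pvK; omega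
  refine ⟨⟨by omega, by omega, by omega⟩, ?_, ?_, ?_, ?_⟩
  · unfold pvLegIdx
    rw [hKv]
    split_ifs <;> omega
  · unfold pvStepOf
    rw [hKv]
    split_ifs <;> omega
  · unfold pvVal pvCStart
    rw [hKv]
    dsimp only
    have hq1 := pv_half (3 * k)
    have hq2 := pv_half (3 * k + 1)
    have hq3 := pv_half (3 * k + 2)
    split_ifs <;> first | omega | linarith
  · intro r c h1 h2 h3 hidx hstep
    simp only [pvLegIdx, pvStepOf, pvK] at hidx hstep
    split_ifs at hidx hstep <;> constructor <;> omega

lemma pv_cell_up (n k t : Int) (hk : 0 ≤ k) (hn : 3 * k + 2 < n) (ht0 : 0 ≤ t)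
    (ht : t < n - 3 * k - 2) :
    (0 ≤ n - 2 * k - 2 - t ∧ n - 2 * k - 2 - t ≤ n - 2 - k - t ∧ n - 2 - k - t < n) ∧
    pvLegIdx n (n - 2 - k - t) (n - 2 * k - 2 - t) = 3 * k + 2 ∧
    pvStepOf n (n - 2 - k - t) (n - 2 * k - 2 - t) = t ∧
    pvVal n (n - 2 - k - t) (n - 2 * k - 2 - t) = pvCStart n (3 * k + 2) + t ∧
    (∀ r c : Int, 0 ≤ c → c ≤ r → r < n → pvLegIdx n r c = 3 * k + 2 → pvStepOf n r c = t →
      r = n - 2 - k - t ∧ c = n - 2 * k - 2 - t) := by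
  have hKv : pvK n (n - 2 - k - t) (n - 2 * k - 2 - t) = k := by unfold pvK; omega
  refine ⟨⟨by omega, by omega, by omega⟩, ?_, ?_, ?_, ?_⟩
  · unfold pvLegIdx
    rw [hKv]
    split_ifs <;> omega
  · unfold pvStepOf
    rw [hKv]
    split_ifs <;> omega
  · unfold pvVal pvCStart
    rw [hKv]
    dsimp only
    have hq1 := pv_half (3 * k)
    have hq2 := pv_half (3 * k + 1)
    have hq3 := pv_half (3 * k + 2)
    split_ifs <;> first | omega | linarith
  · intro r c h1 h2 h3 hidx hstep
    simp only [pvLegIdx, pvStepOf, pvK] at hidx hstep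
    split_ifs at hidx hstep <;> constructor <;> omega

lemma matrixOf_congr (N : Nat) (f g : Int → Int → Int)
    (h : ∀ r c : Int, 0 ≤ r → 0 ≤ c → f r c = g r c) : matrixOf N f = matrixOf N g := by
  unfold matrixOf
  apply List.map_congr_left
  intro r _
  apply List.map_congr_left
  intro c _
  exact h r c (by omega) (by omega)

-- rolling the model over a leg boundary
lemma pv_model_roll (n i : Int) (h0 : 0 ≤ i) (r c : Int) :
    pvModel n i (n - i) r c = pvModel n (i + 1) 0 r c := by
  unfold pvModel pvLegIdx pvStepOf pvK
  split_ifs <;> first | rfl | omega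

lemma pv_cstart_succ (n i : Int) : pvCStart n i + (n - i) = pvCStart n (i + 1) := by
  unfold pvCStart
  have h1 := pv_half i
  have h2 := pv_half (i + 1)
  linarith

-- one leg of A preserves the closed-form invariant
lemma pv_legA_inv (n i : Int) (h0 : 0 ≤ i) (hin : i < n) :
    pvLegA n (matrixOf n.toNat (pvModel n i 0), (pvPos n i).1, (pvPos n i).2, pvCStart n i) i
      = (matrixOf n.toNat (pvModel n (i + 1) 0), (pvPos n (i + 1)).1, (pvPos n (i + 1)).2,
         pvCStart n (i + 1)) := by
  have h3 : (0:Int) < 3 := by norm_num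
  have hmd := PySem.Int.floordiv_mul_add_mod i 3
  have hm0 := PySem.Int.mod_nonneg i h3
  have hm1 := PySem.Int.mod_lt i h3
  have hKc : (((n - i).toNat : Int)) = n - i := by omega
  have hdd : PySem.Int.mod i 3 = 0 ∨ PySem.Int.mod i 3 = 1 ∨ PySem.Int.mod i 3 = 2 := by omega
  rcases hdd with hm | hm | hm
  · -- down leg, direction (1, 0)
    obtain ⟨k, hfd, hi⟩ : ∃ k, PySem.Int.floordiv i 3 = k ∧ i = 3 * k :=
      ⟨PySem.Int.floordiv i 3, rfl, by omega⟩
    have hp : pvPos n i = (2 * k - 1, k) := by unfold pvPos; rw [hfd, hm]; norm_num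
    have hp2 : pvPos n (i + 1) = (n - k - 1, k) := by
      obtain ⟨e1, e2⟩ := pv_div3 (i + 1) k 1 (by omega) (by omega) (by omega)
      unfold pvPos; rw [e1, e2]; norm_num
    unfold pvLegA
    rw [PySem.List.foldl_congr_mem _ (pvStepA i) (fun st _ => pvStep 1 0 st) _
      (by intro acc x hx; simp only [pvStepA, pvStep]; rw [hm]; norm_num)]
    rw [hp, pv_foldl_ign (pvStep 1 0), PySem.List.length_pyRange_one, pv_leg]
    have hc : ∀ t : Nat, t < (n - i).toNat →
        (0 ≤ k + 0 * (1 + (t:Int)) ∧ k + 0 * (1 + (t:Int)) ≤ 2 * k - 1 + 1 * (1 + (t:Int)) ∧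
          2 * k - 1 + 1 * (1 + (t:Int)) < n) ∧
        pvLegIdx n (2 * k - 1 + 1 * (1 + (t:Int))) (k + 0 * (1 + (t:Int))) = i ∧
        pvStepOf n (2 * k - 1 + 1 * (1 + (t:Int))) (k + 0 * (1 + (t:Int))) = (t:Int) ∧
        pvVal n (2 * k - 1 + 1 * (1 + (t:Int))) (k + 0 * (1 + (t:Int))) = pvCStart n i + t ∧
        (∀ r c : Int, 0 ≤ c → c ≤ r → r < n →
          pvLegIdx n r c = i → pvStepOf n r c = (t:Int) →
          r = 2 * k - 1 + 1 * (1 + (t:Int)) ∧ c = k + 0 * (1 + (t:Int))) := by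
      intro t ht
      obtain ⟨hb, hidx, hstep, hval, huniq⟩ :=
        pv_cell_down n k t (by omega) (by omega) (by omega) (by omega)
      have e1 : 2 * k - 1 + 1 * (1 + (t:Int)) = 2 * k + t := by ring
      have e2 : k + 0 * (1 + (t:Int)) = k := by ring
      rw [e1, e2, hi]
      exact ⟨⟨by omega, by omega, by omega⟩, hidx, hstep, hval,
        fun r c a1 a2 a3 a4 a5 => huniq r c a1 a2 a3 a4 a5⟩
    rw [pv_fill n i (2 * k - 1) k 1 0 (n - i).toNat hc]
    simp only [Prod.mk.injEq]
    refine ⟨?_, by rw [hp2]; omega, by rw [hp2]; omega, by rw [hKc]; exact pv_cstart_succ n i⟩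
    rw [hKc]
    exact matrixOf_congr _ _ _ (fun r c _ _ => pv_model_roll n i h0 r c)
  · -- right leg, direction (0, 1)
    obtain ⟨k, hfd, hi⟩ : ∃ k, PySem.Int.floordiv i 3 = k ∧ i = 3 * k + 1 :=
      ⟨PySem.Int.floordiv i 3, rfl, by omega⟩
    have hp : pvPos n i = (n - k - 1, k) := by unfold pvPos; rw [hfd, hm]; norm_num
    have hp2 : pvPos n (i + 1) = (n - 1 - k, n - 2 * k - 1) := by
      obtain ⟨e1, e2⟩ := pv_div3 (i + 1) k 2 (by omega) (by omega) (by omega)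
      unfold pvPos; rw [e1, e2]; norm_num
    unfold pvLegA
    rw [PySem.List.foldl_congr_mem _ (pvStepA i) (fun st _ => pvStep 0 1 st) _
      (by intro acc x hx; simp only [pvStepA, pvStep]; rw [hm]; norm_num)]
    rw [hp, pv_foldl_ign (pvStep 0 1), PySem.List.length_pyRange_one, pv_leg]
    have hc : ∀ t : Nat, t < (n - i).toNat →
        (0 ≤ k + 1 * (1 + (t:Int)) ∧ k + 1 * (1 + (t:Int)) ≤ n - k - 1 + 0 * (1 + (t:Int)) ∧
          n - k - 1 + 0 * (1 + (t:Int)) < n) ∧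
        pvLegIdx n (n - k - 1 + 0 * (1 + (t:Int))) (k + 1 * (1 + (t:Int))) = i ∧
        pvStepOf n (n - k - 1 + 0 * (1 + (t:Int))) (k + 1 * (1 + (t:Int))) = (t:Int) ∧
        pvVal n (n - k - 1 + 0 * (1 + (t:Int))) (k + 1 * (1 + (t:Int))) = pvCStart n i + t ∧
        (∀ r c : Int, 0 ≤ c → c ≤ r → r < n →
          pvLegIdx n r c = i → pvStepOf n r c = (t:Int) →
          r = n - k - 1 + 0 * (1 + (t:Int)) ∧ c = k + 1 * (1 + (t:Int))) := by
      intro t ht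
      obtain ⟨hb, hidx, hstep, hval, huniq⟩ :=
        pv_cell_right n k t (by omega) (by omega) (by omega) (by omega)
      have e1 : n - k - 1 + 0 * (1 + (t:Int)) = n - 1 - k := by ring
      have e2 : k + 1 * (1 + (t:Int)) = k + 1 + t := by ring
      rw [e1, e2, hi]
      exact ⟨⟨by omega, by omega, by omega⟩, hidx, hstep, hval,
        fun r c a1 a2 a3 a4 a5 => huniq r c a1 a2 a3 a4 a5⟩
    rw [pv_fill n i (n - k - 1) k 0 1 (n - i).toNat hc]
    simp only [Prod.mk.injEq]
    refine ⟨?_, by rw [hp2]; omega, by rw [hp2]; omega, by rw [hKc]; exact pv_cstart_succ n i⟩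
    rw [hKc]
    exact matrixOf_congr _ _ _ (fun r c _ _ => pv_model_roll n i h0 r c)
  · -- up-left leg, direction (-1, -1)
    obtain ⟨k, hfd, hi⟩ : ∃ k, PySem.Int.floordiv i 3 = k ∧ i = 3 * k + 2 :=
      ⟨PySem.Int.floordiv i 3, rfl, by omega⟩
    have hp : pvPos n i = (n - 1 - k, n - 2 * k - 1) := by unfold pvPos; rw [hfd, hm]; norm_num
    have hp2 : pvPos n (i + 1) = (2 * (k + 1) - 1, k + 1) := by
      obtain ⟨e1, e2⟩ := pv_div3 (i + 1) (k + 1) 0 (by omega) (by omega) (by omega)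
      unfold pvPos; rw [e1, e2]; norm_num
    unfold pvLegA
    rw [PySem.List.foldl_congr_mem _ (pvStepA i) (fun st _ => pvStep (-1) (-1) st) _
      (by intro acc x hx; simp only [pvStepA, pvStep]; rw [hm]; norm_num [sub_eq_add_neg])]
    rw [hp, pv_foldl_ign (pvStep (-1) (-1)), PySem.List.length_pyRange_one, pv_leg]
    have hc : ∀ t : Nat, t < (n - i).toNat →
        (0 ≤ n - 2 * k - 1 + (-1) * (1 + (t:Int)) ∧
          n - 2 * k - 1 + (-1) * (1 + (t:Int)) ≤ n - 1 - k + (-1) * (1 + (t:Int)) ∧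
          n - 1 - k + (-1) * (1 + (t:Int)) < n) ∧
        pvLegIdx n (n - 1 - k + (-1) * (1 + (t:Int))) (n - 2 * k - 1 + (-1) * (1 + (t:Int))) = i ∧
        pvStepOf n (n - 1 - k + (-1) * (1 + (t:Int))) (n - 2 * k - 1 + (-1) * (1 + (t:Int))) = (t:Int) ∧
        pvVal n (n - 1 - k + (-1) * (1 + (t:Int))) (n - 2 * k - 1 + (-1) * (1 + (t:Int)))
          = pvCStart n i + t ∧
        (∀ r c : Int, 0 ≤ c → c ≤ r → r < n →
          pvLegIdx n r c = i → pvStepOf n r c = (t:Int) →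
          r = n - 1 - k + (-1) * (1 + (t:Int)) ∧ c = n - 2 * k - 1 + (-1) * (1 + (t:Int))) := by
      intro t ht
      obtain ⟨hb, hidx, hstep, hval, huniq⟩ :=
        pv_cell_up n k t (by omega) (by omega) (by omega) (by omega)
      have e1 : n - 1 - k + (-1) * (1 + (t:Int)) = n - 2 - k - t := by ring
      have e2 : n - 2 * k - 1 + (-1) * (1 + (t:Int)) = n - 2 * k - 2 - t := by ring
      rw [e1, e2, hi]
      exact ⟨⟨by omega, by omega, by omega⟩, hidx, hstep, hval,
        fun r c a1 a2 a3 a4 a5 => huniq r c a1 a2 a3 a4 a5⟩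
    rw [pv_fill n i (n - 1 - k) (n - 2 * k - 1) (-1) (-1) (n - i).toNat hc]
    simp only [Prod.mk.injEq]
    refine ⟨?_, by rw [hp2]; omega, by rw [hp2]; omega, by rw [hKc]; exact pv_cstart_succ n i⟩
    rw [hKc]
    exact matrixOf_congr _ _ _ (fun r c _ _ => pv_model_roll n i h0 r c)

-- outer loop: all legs together build the fully-filled model
lemma pv_outer (n : Int) : ∀ (m : Nat) (i : Int), 0 ≤ i → i ≤ n → (n - i).toNat = m →
    (PySem.List.pyRange i n 1).foldl (pvLegA n)
      (matrixOf n.toNat (pvModel n i 0), (pvPos n i).1, (pvPos n i).2, pvCStart n i)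
    = (matrixOf n.toNat (pvModel n n 0), (pvPos n n).1, (pvPos n n).2, pvCStart n n) := by
  intro m
  induction m with
  | zero =>
    intro i h0 h1 hm
    have hin : i = n := by omega
    subst hin
    rw [PySem.List.pyRange_one_eq_nil (le_refl i)]
    rfl
  | succ m ih =>
    intro i h0 h1 hm
    have hin : i < n := by omega
    rw [PySem.List.pyRange_one_cons hin]
    simp only [List.foldl_cons]
    rw [pv_legA_inv n i h0 hin]
    exact ih (i + 1) (by omega) (by omega) (by omega)

lemma pv_model_zero (n r c : Int) : pvModel n 0 0 r c = 0 := by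
  unfold pvModel pvLegIdx pvStepOf pvK
  split_ifs <;> first | rfl | (exfalso; omega)

-- A's initial state is the model at leg 0
lemma pv_init (n : Int) :
    (List.replicate n.toNat (List.replicate n.toNat (0:Int)), (-1 : Int), (0 : Int), (1 : Int))
      = (matrixOf n.toNat (pvModel n 0 0), (pvPos n 0).1, (pvPos n 0).2, pvCStart n 0) := by
  have h1 : matrixOf n.toNat (pvModel n 0 0)
      = List.replicate n.toNat (List.replicate n.toNat (0:Int)) := by
    rw [matrixOf_congr _ _ (fun _ _ => 0) (fun r c _ _ => pv_model_zero n r c)]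
    unfold matrixOf
    simp [List.map_const']
  have h2 : pvPos n 0 = (-1, 0) := by
    obtain ⟨e1, e2⟩ := pv_div3 0 0 0 (by ring) (le_refl 0) (by norm_num)
    unfold pvPos
    rw [e1, e2]
    norm_num
  have h3 : pvCStart n 0 = 1 := by
    unfold pvCStart
    have hq := pv_half 0
    linarith
  rw [h1, h2, h3]

-- the fully-filled model is the triangle of closed-form values
lemma pv_legIdx_lt (n r c : Int) (h1 : 0 ≤ c) (h2 : c ≤ r) (h3 : r < n) :
    pvLegIdx n r c < n := by
  unfold pvLegIdx pvK
  split_ifs <;> omega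

lemma pv_model_tri (n r c : Int) (h1 : 0 ≤ c) (h2 : c ≤ r) (h3 : r < n) :
    pvModel n n 0 r c = pvVal n r c := by
  unfold pvModel
  rw [if_pos ⟨h1, h2, h3, Or.inl (pv_legIdx_lt n r c h1 h2 h3)⟩]

lemma pv_model_out (n r c : Int) (h : ¬ (0 ≤ c ∧ c ≤ r ∧ r < n)) :
    pvModel n n 0 r c = 0 := by
  unfold pvModel
  rw [if_neg (by tauto)]

-- every triangle cell holds a positive number
lemma pv_val_pos (n r c : Int) (h1 : 0 ≤ c) (h2 : c ≤ r) (h3 : r < n) :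
    1 ≤ pvVal n r c := by
  unfold pvVal pvK
  dsimp only
  have hk1 : min c (min (n - 1 - r) (r - c)) ≤ c := by omega
  have hk2 : min c (min (n - 1 - r) (r - c)) ≤ n - 1 - r := by omega
  have hk3 : min c (min (n - 1 - r) (r - c)) ≤ r - c := by omega
  have hk0 : 0 ≤ min c (min (n - 1 - r) (r - c)) := by omega
  have hq := pv_half (3 * min c (min (n - 1 - r) (r - c)))
  have hprod : 0 ≤ 3 * min c (min (n - 1 - r) (r - c)) *
      (2 * n - 3 * min c (min (n - 1 - r) (r - c)) + 1) :=
    mul_nonneg (by omega) (by omega)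
  split_ifs <;> nlinarith [hq, hprod]

-- one matrix row of the final model, filtered, is one triangle row of B
lemma pv_row (n : Int) (r : Nat) (hr : r < n.toNat) :
    ((List.range n.toNat).map (fun (c : Nat) => pvModel n n 0 (r : Int) (c : Int))).filter
        (fun v => decide (v ≠ 0))
      = (List.range (r + 1)).map (fun (c : Nat) => pvVal n (r : Int) (c : Int)) := by
  rw [show n.toNat = (r + 1) + (n.toNat - (r + 1)) from by omega, List.range_add,
    List.map_append, List.filter_append]
  have hA : ((List.range (r + 1)).map (fun (c : Nat) => pvModel n n 0 (r : Int) (c : Int)))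
      = (List.range (r + 1)).map (fun (c : Nat) => pvVal n (r : Int) (c : Int)) := by
    apply List.map_congr_left
    intro c hc
    simp only [List.mem_range] at hc
    exact pv_model_tri n r c (by omega) (by omega) (by omega)
  rw [hA, List.filter_eq_self.mpr ?_, List.filter_eq_nil_iff.mpr ?_, List.append_nil]
  · intro a ha
    obtain ⟨c, hc, rfl⟩ := List.mem_map.mp ha
    obtain ⟨x, hx, rfl⟩ := List.mem_map.mp hc
    simp only [List.mem_range] at hx
    rw [pv_model_out n (r : Int) (((r + 1) + x : Nat) : Int) (by push_cast; omega)]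
    simp
  · intro a ha
    obtain ⟨c, hc, rfl⟩ := List.mem_map.mp ha
    simp only [List.mem_range] at hc
    have hv := pv_val_pos n r c (by omega) (by omega) (by omega)
    show decide (pvVal n (r : Int) (c : Int) ≠ 0) = true
    rw [decide_eq_true_eq]
    omega

-- the row-major nonzero scan of the final model is exactly B's output
lemma pv_final (n : Int) :
    (matrixOf n.toNat (pvModel n n 0)).flatMap (fun row => row.filter (fun v => decide (v ≠ 0)))
      = solution_alt n := by
  unfold matrixOf solution_alt
  rw [List.flatMap_map, PySem.List.pyRange_one 0 n, List.flatMap_map]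
  simp only [zero_add, sub_zero]
  apply List.flatMap_congr
  intro r hr
  simp only [List.mem_range] at hr
  rw [pv_row n r (by omega), PySem.List.pyRange_one 0 ((r : Int) + 1), List.map_map]
  simp only [zero_add, sub_zero]
  rw [show ((r : Int) + 1).toNat = r + 1 from by omega]
  apply List.map_congr_left
  intro c hc
  simp [Function.comp]

-- A's final nonzero scan over any n×n matrix is a flatMap of row filters
lemma pv_extract (n : Int) (hn : 0 ≤ n) (arr : List (List Int))
    (hL : arr.length = n.toNat) (hm : ∀ r ∈ arr, r.length = n.toNat) :
    (PySem.List.pyRange 0 n 1).foldl (fun ans i =>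
      (PySem.List.pyRange 0 n 1).foldl (fun ans j =>
        if PySem.List.pyGetD (PySem.List.pyGetD arr i []) j 0 ≠ 0 then
          ans ++ [PySem.List.pyGetD (PySem.List.pyGetD arr i []) j 0]
        else ans) ans) []
    = arr.flatMap (fun row => row.filter (fun v => decide (v ≠ 0))) := by
  have hn' : n = (arr.length : Int) := by rw [hL]; omega
  rw [hn']
  rw [PySem.List.foldl_pyRange_zero_pyGetD' arr []
    (fun acc row => (PySem.List.pyRange 0 (arr.length : Int) 1).foldl
      (fun ans j => if PySem.List.pyGetD row j 0 ≠ 0 then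
        ans ++ [PySem.List.pyGetD row j 0] else ans) acc) []]
  rw [PySem.List.foldl_congr_mem _ _
    (fun ans row => ans ++ row.filter (fun v => decide (v ≠ 0))) _ ?_]
  · rw [PySem.List.foldl_append_eq_flatMap]
    simp
  · intro ans row hrow
    have hrl : (arr.length : Int) = (row.length : Int) := by
      rw [hL, hm row hrow]
    rw [hrl, PySem.List.foldl_pyRange_zero_pyGetD' row 0
      (fun a v => if v ≠ 0 then a ++ [v] else a)]
    rw [PySem.List.foldl_append_ite_eq_filter]

theorem solution_spec : Claim_equal_solution := by
  intro n _
  simp only [Spec_solution]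
  unfold solution
  dsimp only
  by_cases hn : 0 ≤ n
  · rw [pv_init n, pv_outer n (n - 0).toNat 0 (le_refl 0) hn rfl]
    have hshape1 : (matrixOf n.toNat (pvModel n n 0)).length = n.toNat := by
      unfold matrixOf; simp
    have hshape2 : ∀ r ∈ matrixOf n.toNat (pvModel n n 0), r.length = n.toNat := by
      intro r hr
      unfold matrixOf at hr
      obtain ⟨a, _, rfl⟩ := List.mem_map.mp hr
      simp
    rw [pv_extract n hn _ hshape1 hshape2, pv_final n]
  · rw [PySem.List.pyRange_one_eq_nil (by omega : n ≤ 0)]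
    unfold solution_alt
    rw [PySem.List.pyRange_one_eq_nil (by omega : n ≤ 0)]
    rfl
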